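-- pv_equiv track=rewrite | github.com/Noble-Mushtak/Linear-Algebra-Library | numerical.py | matrix_column_addition
-- ===== SOURCE A (Python) =====
-- def matrix_column_addition(matrix, column_index1, column_index2, scalar):
--     '''
--     Given a matrix, two integers representing the indices of
--      two different columns, and a scalar,
--      add the first column by the scalar times the second column.
--
--     Note that this does not modify the given matrix in place,
--      but rather returns a new matrix.
--     '''
--     if column_index1 < 0 or column_index1 >= len(matrix[0]):
--         raise ValueError("Column index does not make sense")
--     if column_index2 < 0 or column_index2 >= len(matrix[0]):
--         raise ValueError("Column index does not make sense")
--
--     return [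
--         [
--             matrix[i][j]+
--               (scalar if j == column_index1 else 0) *
--                 matrix[i][column_index2]
--             for j in range(len(matrix[i]))
--         ]
--         for i in range(len(matrix))
--     ]
-- ===== SOURCE B (Python) =====
-- def matrix_column_addition(matrix, column_index1, column_index2, scalar):
--     if column_index1 < 0 or column_index1 >= len(matrix[0]):
--         raise ValueError("Column index does not make sense")
--     if column_index2 < 0 or column_index2 >= len(matrix[0]):
--         raise ValueError("Column index does not make sense")
--     columns = [list(col) for col in zip(*matrix)]
--     columns[column_index1] = [x + scalar * y
--                               for x, y in zip(columns[column_index1],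
--                                               columns[column_index2])]
--     return [list(row) for row in zip(*columns)]
-- ===== Notes on version B (the rewrite author's own statement) =====
-- stated objective: alternative
-- what changed: B works column-wise: it transposes the matrix, replaces column c1 by an elementwise zip-sum with scalar times column c2, and transposes back, instead of A's per-entry rebuild with an ite-scalar multiplied into every cell; Pre_ excludes ragged matrices, where A's silent skipping of short rows is an accident of its per-row range(len(row)) loop.
-- outside the precondition, e.g. on matrix_column_addition([[1, 2], [3]], 0, 0, 2): A returns [[3, 2], [9]], B returns [[3], [9]]
import Mathlib
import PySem

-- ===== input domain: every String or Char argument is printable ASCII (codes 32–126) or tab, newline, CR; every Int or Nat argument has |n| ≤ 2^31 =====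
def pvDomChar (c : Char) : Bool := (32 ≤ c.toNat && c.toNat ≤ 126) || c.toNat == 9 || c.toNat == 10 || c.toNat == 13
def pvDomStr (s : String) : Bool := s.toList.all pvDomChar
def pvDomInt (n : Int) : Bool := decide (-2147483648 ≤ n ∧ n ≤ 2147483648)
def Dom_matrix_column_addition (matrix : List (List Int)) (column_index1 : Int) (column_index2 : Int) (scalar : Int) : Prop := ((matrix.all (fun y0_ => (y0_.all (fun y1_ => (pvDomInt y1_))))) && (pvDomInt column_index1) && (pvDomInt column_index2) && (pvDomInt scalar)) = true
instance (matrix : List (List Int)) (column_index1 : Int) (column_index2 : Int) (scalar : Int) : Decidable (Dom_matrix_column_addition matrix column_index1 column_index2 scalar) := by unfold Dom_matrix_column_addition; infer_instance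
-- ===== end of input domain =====

-- B is column-wise: transpose, replace column c1 by a zip-sum with scalar times column c2,
-- transpose back (objective: alternative; same cost, different traversal).

-- ===== PORT A =====
-- literal port of A's nested list comprehension; the ValueError guards and all IndexErrors
-- are excluded by Pre_ below.
def matrix_column_addition (matrix : List (List Int)) (column_index1 : Int) (column_index2 : Int) (scalar : Int) : List (List Int) :=
  (PySem.List.pyRange 0 matrix.length 1).map (fun i =>
    let row := PySem.List.pyGetD matrix i []
    (PySem.List.pyRange 0 row.length 1).map (fun j =>
      PySem.List.pyGetD row j 0 +
        (if j = column_index1 then scalar else 0) * PySem.List.pyGetD row column_index2 0))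

-- ===== PORT B =====
-- hand port of Python's truncating zip(*xss): rows = min of the lengths; exact for every
-- list of lists (min? of [] is none, so zip(*[]) = []).
def pyZipStar (xss : List (List Int)) : List (List Int) :=
  (List.range (((xss.map List.length).min?).getD 0)).map (fun j => xss.map (fun r => r.getD j 0))

-- port of Source B; columns[c1] read/written via toNat since Pre_ gives 0 ≤ c1 (Python would wrap a
-- negative index, which Pre_ excludes).
def matrix_column_addition_alt (matrix : List (List Int)) (column_index1 : Int) (column_index2 : Int) (scalar : Int) : List (List Int) :=
  let columns := pyZipStar matrix
  let newcol := ((columns.getD column_index1.toNat []).zip (columns.getD column_index2.toNat [])).map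
                  (fun p => p.1 + scalar * p.2)
  pyZipStar (columns.set column_index1.toNat newcol)

-- ===== PRECONDITION & SPEC =====
-- Pre_ excludes the inputs where A raises (empty matrix, out-of-range column index, a nonempty
-- row shorter than column_index2+1) and also ragged matrices on which A still returns: there
-- A's silent skipping of rows shorter than column_index1+1 is an accident of its per-row
-- range(len(row)) loop, not column arithmetic (see cites in claim.json).
def Pre_matrix_column_addition (matrix : List (List Int)) (column_index1 : Int) (column_index2 : Int) (scalar : Int) : Prop :=
  matrix ≠ [] ∧ (∀ row ∈ matrix, row.length = (matrix.headD []).length) ∧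
  0 ≤ column_index1 ∧ column_index1 < ((matrix.headD []).length : Int) ∧
  0 ≤ column_index2 ∧ column_index2 < ((matrix.headD []).length : Int)
instance (matrix : List (List Int)) (column_index1 : Int) (column_index2 : Int) (scalar : Int) : Decidable (Pre_matrix_column_addition matrix column_index1 column_index2 scalar) := by unfold Pre_matrix_column_addition; infer_instance

def pvWitness_matrix_column_addition : List (List Int) × Int × Int × Int := ([[1, 2], [3, 4]], 0, 1, 5)

def Spec_matrix_column_addition (matrix : List (List Int)) (column_index1 : Int) (column_index2 : Int) (scalar : Int) (out : List (List Int)) : Prop := out = matrix_column_addition_alt matrix column_index1 column_index2 scalar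
instance (matrix : List (List Int)) (column_index1 : Int) (column_index2 : Int) (scalar : Int) (out : List (List Int)) : Decidable (Spec_matrix_column_addition matrix column_index1 column_index2 scalar out) := by unfold Spec_matrix_column_addition; infer_instance

-- ===== CLAIM (what is proved, stated in full; the proofs are below) =====
def Claim_equal_matrix_column_addition : Prop := ∀ (matrix : List (List Int)) (column_index1 : Int) (column_index2 : Int) (scalar : Int), Dom_matrix_column_addition matrix column_index1 column_index2 scalar → Pre_matrix_column_addition matrix column_index1 column_index2 scalar → Spec_matrix_column_addition matrix column_index1 column_index2 scalar (matrix_column_addition matrix column_index1 column_index2 scalar)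

-- ===== LEMMAS AND PROOFS =====

-- min? of a nonempty constant list
theorem pv_foldl_min_const (xs : List Nat) (L : Nat) (h : ∀ x ∈ xs, x = L) :
    xs.foldl min L = L := by
  induction xs with
  | nil => rfl
  | cons a tl ih =>
    have ha : a = L := h a (List.mem_cons_self)
    simp only [List.foldl_cons, ha, min_self]
    exact ih (fun x hx => h x (List.mem_cons_of_mem _ hx))

theorem pv_min?_const (xs : List Nat) (L : Nat) (hne : xs ≠ []) (h : ∀ x ∈ xs, x = L) :
    xs.min? = some L := by
  cases xs with
  | nil => exact absurd rfl hne
  | cons a tl =>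
    have ha : a = L := h a (List.mem_cons_self)
    rw [List.min?_cons', ha, pv_foldl_min_const tl L (fun x hx => h x (List.mem_cons_of_mem _ hx))]

-- for a nonempty rectangular list of lists, pyZipStar is the usual transpose
theorem pv_zipStar_rect (xss : List (List Int)) (L : Nat) (hne : xss ≠ [])
    (h : ∀ r ∈ xss, r.length = L) :
    pyZipStar xss = (List.range L).map (fun j => xss.map (fun r => r.getD j 0)) := by
  unfold pyZipStar
  have : (xss.map List.length).min? = some L := by
    apply pv_min?_const _ _ (by simpa using hne)
    intro x hx
    obtain ⟨r, hr, rfl⟩ := List.mem_map.mp hx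
    exact h r hr
  rw [this]
  simp

-- the per-row identity on the A side: the comprehension row equals a single set
theorem pv_row_core (row : List Int) (k : Nat) (s : Int) (hk : k < row.length) :
    (List.range row.length).map (fun j => row.getD j 0 + (if j = k then s else 0))
      = row.set k (row.getD k 0 + s) := by
  apply List.ext_getElem
  · simp
  · intro i h1 h2
    simp only [List.getElem_map, List.getElem_range, List.getElem_set]
    have hi : i < row.length := by simpa using h1
    by_cases hik : i = k
    · subst hik; simp [List.getD, hk]
    · have hk2 : ¬ k = i := fun h => hik h.symm
      simp [hik, hk2, List.getD, hi]

-- A, under Pre_, in row-wise closed form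
theorem pv_A_rows (matrix : List (List Int)) (c1 c2 scalar : Int) (L : Nat)
    (hrect : ∀ row ∈ matrix, row.length = L)
    (h1 : 0 ≤ c1) (h1b : c1 < (L : Int)) (h2 : 0 ≤ c2) (h2b : c2 < (L : Int)) :
    matrix_column_addition matrix c1 c2 scalar
      = matrix.map (fun row => row.set c1.toNat (row.getD c1.toNat 0 + scalar * row.getD c2.toNat 0)) := by
  unfold matrix_column_addition
  have hmap : (PySem.List.pyRange 0 (matrix.length : Int) 1).map (fun i =>
      let row := PySem.List.pyGetD matrix i []
      (PySem.List.pyRange 0 (row.length : Int) 1).map (fun j =>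
        PySem.List.pyGetD row j 0 + (if j = c1 then scalar else 0) * PySem.List.pyGetD row c2 0))
      = matrix.map (fun row =>
        (PySem.List.pyRange 0 (row.length : Int) 1).map (fun j =>
          PySem.List.pyGetD row j 0 + (if j = c1 then scalar else 0) * PySem.List.pyGetD row c2 0)) := by
    have h' : (PySem.List.pyRange 0 (matrix.length : Int) 1).map (fun i =>
        (fun row => (PySem.List.pyRange 0 (row.length : Int) 1).map (fun j =>
          PySem.List.pyGetD row j 0 + (if j = c1 then scalar else 0) * PySem.List.pyGetD row c2 0))
          (PySem.List.pyGetD matrix i []))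
        = ((PySem.List.pyRange 0 (matrix.length : Int) 1).map (fun i => PySem.List.pyGetD matrix i [])).map
            (fun row => (PySem.List.pyRange 0 (row.length : Int) 1).map (fun j =>
              PySem.List.pyGetD row j 0 + (if j = c1 then scalar else 0) * PySem.List.pyGetD row c2 0)) := by
      simp [List.map_map, Function.comp_def]
    rw [h', PySem.List.map_pyGetD_pyRange_zero']
  rw [hmap]
  apply List.map_congr_left
  intro row hrow
  have hL : row.length = L := hrect row hrow
  have hc1 : c1.toNat < row.length := by omega
  have hc2nn : PySem.List.pyGetD row c2 0 = row.getD c2.toNat 0 := by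
    rw [PySem.List.pyGetD_of_nonneg row 0 h2]
  have hstep : (PySem.List.pyRange 0 (row.length : Int) 1).map (fun j =>
      PySem.List.pyGetD row j 0 + (if j = c1 then scalar else 0) * PySem.List.pyGetD row c2 0)
      = (List.range row.length).map (fun j =>
          row.getD j 0 + (if j = c1.toNat then scalar * row.getD c2.toNat 0 else 0)) := by
    rw [PySem.List.pyRange_zero_nat, List.map_map]
    apply List.map_congr_left
    intro j hj
    have hcast : ((j : Int) = c1) ↔ (j = c1.toNat) := by omega
    simp only [Function.comp_def, PySem.List.pyGetD_natCast, hc2nn, hcast]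
    by_cases hjc : j = c1.toNat <;> simp [hjc]
  rw [hstep, pv_row_core row c1.toNat (scalar * row.getD c2.toNat 0) hc1]

-- ===== VERDICT (by name: the statement is the Claim_ definition above) =====
theorem matrix_column_addition_spec : Claim_equal_matrix_column_addition := by
  intro matrix c1 c2 scalar _ hpre
  obtain ⟨hne, hrect, h1, h1b, h2, h2b⟩ := hpre
  set L := (matrix.headD []).length with hLdef
  have hLpos : 0 < L := by omega
  have hc1L : c1.toNat < L := by omega
  have hc2L : c2.toNat < L := by omega
  unfold Spec_matrix_column_addition
  rw [pv_A_rows matrix c1 c2 scalar L hrect h1 h1b h2 h2b]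
  unfold matrix_column_addition_alt
  rw [pv_zipStar_rect matrix L hne hrect]
  set n := matrix.length with hn
  have hnpos : 0 < n := by
    cases matrix with
    | nil => exact absurd rfl hne
    | cons a tl => simp [hn]
  set cols := (List.range L).map (fun j => matrix.map (fun r => r.getD j 0)) with hcols
  have hcolsLen : cols.length = L := by simp [hcols]
  have hcolGet : ∀ (j : Nat) (hj : j < L), cols[j]'(by omega) = matrix.map (fun r => r.getD j 0) := by
    intro j hj
    simp [hcols]
  have hcolGetD : ∀ (j : Nat), j < L → cols.getD j [] = matrix.map (fun r => r.getD j 0) := by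
    intro j hj
    rw [List.getD_eq_getElem cols [] (by omega)]
    exact hcolGet j hj
  set newcol := ((cols.getD c1.toNat []).zip (cols.getD c2.toNat [])).map
      (fun p => p.1 + scalar * p.2) with hnew
  have hnewLen : newcol.length = n := by
    rw [hnew, List.length_map, List.length_zip, hcolGetD c1.toNat hc1L, hcolGetD c2.toNat hc2L]
    simp [hn]
  set cols' := cols.set c1.toNat newcol with hcols'
  have hcols'Len : cols'.length = L := by simp [hcols', hcolsLen]
  have hcols'rect : ∀ r ∈ cols', r.length = n := by
    intro r hr
    rcases List.mem_or_eq_of_mem_set hr with hmem | rfl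
    · obtain ⟨j, hj, rfl⟩ := List.mem_map.mp (hcols ▸ hmem)
      simp [hn]
    · exact hnewLen
  have hcols'ne : cols' ≠ [] := by
    intro h
    have := hcols'Len
    rw [h] at this
    simp at this
    omega
  rw [pv_zipStar_rect cols' n hcols'ne hcols'rect]
  -- now both sides are row-wise maps; compare entries
  apply List.ext_getElem
  · simp [hn]
  · intro i hi1 hi2
    have hiN : i < n := by simpa using hi2
    have hiM : i < matrix.length := by omega
    apply List.ext_getElem
    · have : (matrix[i]'hiM).length = L := hrect _ (List.getElem_mem hiM)
      simp [this, hcols'Len]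
    · intro j hj1 hj2
      have hrowL : (matrix[i]'hiM).length = L := hrect _ (List.getElem_mem hiM)
      have hjL : j < L := by
        simp [hrowL] at hj1; exact hj1
      have hjC : j < cols'.length := by omega
      simp only [List.getElem_map, List.getElem_range, List.getElem_set]
      by_cases hjc : j = c1.toNat
      · subst hjc
        rw [if_pos rfl]
        have hset : cols'[c1.toNat]'hjC = newcol := by
          show (cols.set c1.toNat newcol)[c1.toNat]'hjC = newcol
          rw [List.getElem_set, if_pos rfl]
        have hz : newcol[i]'(by omega) =
            (matrix[i]'hiM).getD c1.toNat 0 + scalar * (matrix[i]'hiM).getD c2.toNat 0 := by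
          simp only [hnew, List.getElem_map, List.getElem_zip,
            hcolGetD c1.toNat hc1L, hcolGetD c2.toNat hc2L]
        rw [hset, List.getD_eq_getElem newcol 0 (by omega), hz]
      · rw [if_neg (fun h => hjc h.symm)]
        have hset : cols'[j]'hjC = matrix.map (fun r => r.getD j 0) := by
          show (cols.set c1.toNat newcol)[j]'hjC = matrix.map (fun r => r.getD j 0)
          rw [List.getElem_set, if_neg (fun h => hjc h.symm)]
          exact hcolGet j hjL
        have hm : (List.map (fun r => r.getD j 0) matrix).getD i 0 = (matrix[i]'hiM).getD j 0 := by
          rw [List.getD_eq_getElem _ 0 (by simpa using hiM), List.getElem_map]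
        rw [hset, hm]
        exact (List.getD_eq_getElem _ 0 (by omega)).symm
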